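-- pv_equiv track=rewrite | github.com/ChrisLochhead/GaitMonitor | Code/Programs/Data_Processing/Utilities.py | convert_to_sequences
-- ===== SOURCE A (Python) =====
-- def convert_to_sequences(abs_data):
--     pass
--     #Iterate through abs_data, get head coords at 5 after first frame and 5 before last
--     sequences = []
--     sequence = []
--     for i, joint in enumerate(abs_data):
--         if i < len(abs_data) - 1:
--             #If this number in sequence is a higher number than the next, then the next is a new
--             #Instance
--             if joint[1] > abs_data[i + 1][1]:
--                 sequence.append(joint)
--                 sequences.append(sequence)
--                 sequence = []
--             else:
--                 sequence.append(joint)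
--         else:
--             #Just add last one to sequence
--             sequence.append(joint)
--     #Add last sequence which is the remainder
--     sequences.append(sequence)
--     return sequences
-- ===== SOURCE B (Python) =====
-- def convert_to_sequences(abs_data):
--     # Backward scan: walk the frames in reverse, compare each frame with the one
--     # after it (remembered in nxt), and build the groups back-to-front.
--     groups = []
--     cur = []
--     nxt = None
--     for joint in reversed(abs_data):
--         if nxt is not None and joint[1] > nxt[1]:
--             groups.append(cur[::-1])
--             cur = [joint]
--         else:
--             cur.append(joint)
--         nxt = joint
--     groups.append(cur[::-1])
--     groups.reverse()
--     return groups
-- ===== Notes on version B (the rewrite author's own statement) =====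
-- stated objective: alternative
-- what changed: Replaces A's forward loop with enumerate/len lookahead and flush-on-boundary accumulator by a single backward scan that compares each frame with the remembered next frame (no index arithmetic) and builds the groups back-to-front, reversing once at the end.
import Mathlib
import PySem

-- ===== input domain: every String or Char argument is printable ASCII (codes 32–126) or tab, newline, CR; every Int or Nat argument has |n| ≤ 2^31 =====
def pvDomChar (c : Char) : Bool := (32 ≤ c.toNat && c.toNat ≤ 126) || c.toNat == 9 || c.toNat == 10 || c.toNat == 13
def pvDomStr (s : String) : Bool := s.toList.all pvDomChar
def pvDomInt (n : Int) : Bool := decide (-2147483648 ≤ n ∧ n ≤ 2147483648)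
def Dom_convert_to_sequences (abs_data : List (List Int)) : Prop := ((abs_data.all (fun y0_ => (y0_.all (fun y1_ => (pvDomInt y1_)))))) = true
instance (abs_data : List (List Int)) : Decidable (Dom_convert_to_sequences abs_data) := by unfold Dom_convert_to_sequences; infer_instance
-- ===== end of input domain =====

-- B replaces A's forward flush-on-boundary loop (enumerate + len lookahead) by a backward
-- scan that remembers the next frame and builds the groups back-to-front (objective: alternative).

-- ===== PORT A =====
-- the Python for-loop over enumerate(abs_data): state (i, sequences, sequence), one step per element
def convertLoopA (abs_data : List (List Int)) :
    List (List Int) → Int → List (List (List Int)) → List (List Int) →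
    List (List (List Int)) × List (List Int)
  | [], _, seqs, seq => (seqs, seq)
  | joint :: rest, i, seqs, seq =>
    if i < (abs_data.length : Int) - 1 then
      if PySem.List.pyGetD joint 1 0 > PySem.List.pyGetD (PySem.List.pyGetD abs_data (i + 1) []) 1 0 then
        convertLoopA abs_data rest (i + 1) (seqs ++ [seq ++ [joint]]) []
      else
        convertLoopA abs_data rest (i + 1) seqs (seq ++ [joint])
    else
      convertLoopA abs_data rest (i + 1) seqs (seq ++ [joint])

def convert_to_sequences (abs_data : List (List Int)) : List (List (List Int)) :=
  let st := convertLoopA abs_data abs_data 0 [] []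
  st.1 ++ [st.2]

-- ===== PORT B =====
-- one loop step of Source B: state (groups, cur, nxt)
def stepB (st : List (List (List Int)) × List (List Int) × Option (List Int)) (joint : List Int) :
    List (List (List Int)) × List (List Int) × Option (List Int) :=
  match st with
  | (groups, cur, nxt) =>
    match nxt with
    | some nx =>
      if PySem.List.pyGetD joint 1 0 > PySem.List.pyGetD nx 1 0 then
        (groups ++ [cur.reverse], [joint], some joint)
      else
        (groups, cur ++ [joint], some joint)
    | none => (groups, cur ++ [joint], some joint)

def convert_to_sequences_alt (abs_data : List (List Int)) : List (List (List Int)) :=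
  let st := abs_data.reverse.foldl stepB ([], [], none)
  (st.1 ++ [st.2.1.reverse]).reverse

-- ===== PRECONDITION & SPEC =====
-- Pre_ excludes exactly the inputs on which Python A raises IndexError: with at least two
-- frames, every frame's [1] is read, so every row must have length ≥ 2.
def Pre_convert_to_sequences (abs_data : List (List Int)) : Prop :=
  abs_data.length ≤ 1 ∨ ∀ r ∈ abs_data, 2 ≤ r.length
instance (abs_data : List (List Int)) : Decidable (Pre_convert_to_sequences abs_data) := by
  unfold Pre_convert_to_sequences; infer_instance

def pvWitness_convert_to_sequences : List (List Int) := [[0, 5], [0, 3], [0, 4]]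

def Spec_convert_to_sequences (abs_data : List (List Int)) (out : List (List (List Int))) : Prop := out = convert_to_sequences_alt abs_data
instance (abs_data : List (List Int)) (out : List (List (List Int))) : Decidable (Spec_convert_to_sequences abs_data out) := by unfold Spec_convert_to_sequences; infer_instance

-- ===== CLAIM (what is proved, stated in full; the proofs are below) =====
def Claim_equal_convert_to_sequences : Prop := ∀ (abs_data : List (List Int)), Dom_convert_to_sequences abs_data → Pre_convert_to_sequences abs_data → Spec_convert_to_sequences abs_data (convert_to_sequences abs_data)

-- ===== LEMMAS AND PROOFS =====

-- reference grouping: structural recursion on the frame list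
def groupRec : List (List Int) → List (List (List Int))
  | [] => [[]]
  | [x] => [[x]]
  | x :: y :: r =>
    if PySem.List.pyGetD x 1 0 > PySem.List.pyGetD y 1 0 then
      [x] :: groupRec (y :: r)
    else
      match groupRec (y :: r) with
      | [] => [[x]]          -- unreachable
      | g :: gs => (x :: g) :: gs

theorem groupRec_ne_nil (l : List (List Int)) : groupRec l ≠ [] := by
  match l with
  | [] => simp [groupRec]
  | [x] => simp [groupRec]
  | x :: y :: r =>
    unfold groupRec
    split
    · simp
    · split <;> simp

-- B's backward foldl, viewed as a foldr over the original list
def foldB (l : List (List Int)) : List (List (List Int)) × List (List Int) × Option (List Int) :=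
  l.foldr (fun x acc => stepB acc x) ([], [], none)

theorem B_foldr_eq (l : List (List Int)) :
    ((foldB l).1 ++ [(foldB l).2.1.reverse]).reverse = groupRec l ∧ (foldB l).2.2 = l.head? := by
  induction l with
  | nil => simp [foldB, groupRec]
  | cons x xs ih =>
    obtain ⟨ih1, ih2⟩ := ih
    have hfold : foldB (x :: xs) = stepB (foldB xs) x := rfl
    match xs with
    | [] =>
      simp [foldB, stepB, groupRec]
    | y :: r =>
      rw [hfold]
      set st := foldB (y :: r) with hst
      obtain ⟨g, c, nx⟩ := st
      simp only [List.head?_cons] at ih2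
      subst ih2
      by_cases hgt : PySem.List.pyGetD x 1 0 > PySem.List.pyGetD y 1 0
      · simp only [stepB, if_pos hgt]
        refine ⟨?_, rfl⟩
        simp only [List.reverse_append, List.reverse_cons, List.reverse_nil, List.nil_append] at ih1 ⊢
        rw [groupRec, if_pos hgt, ← ih1]
        simp
      · simp only [stepB, if_neg hgt]
        refine ⟨?_, rfl⟩
        simp only [List.reverse_append, List.reverse_cons, List.reverse_nil, List.nil_append] at ih1 ⊢
        rw [groupRec, if_neg hgt, ← ih1]
        simp

theorem B_eq_groupRec (l : List (List Int)) : convert_to_sequences_alt l = groupRec l := by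
  unfold convert_to_sequences_alt
  simp only [List.foldl_reverse]
  exact (B_foldr_eq l).1

-- prepend seq onto the first group
def consHead (seq : List (List Int)) : List (List (List Int)) → List (List (List Int))
  | [] => [seq]
  | g :: gs => (seq ++ g) :: gs

-- A's loop invariant: processing suffix l at index pre.length yields the emitted groups
-- followed by groupRec of the suffix, with the open sequence prepended to its first group
theorem A_loop_eq (abs_data : List (List Int)) :
    ∀ (l pre : List (List Int)) (seqs : List (List (List Int))) (seq : List (List Int)),
      abs_data = pre ++ l →
      (convertLoopA abs_data l (pre.length : Int) seqs seq).1 ++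
        [(convertLoopA abs_data l (pre.length : Int) seqs seq).2] =
      seqs ++ consHead seq (groupRec l) := by
  intro l
  induction l with
  | nil => intro pre seqs seq _; simp [convertLoopA, groupRec, consHead]
  | cons joint rest ih =>
    intro pre seqs seq hsplit
    have hlen : abs_data.length = pre.length + 1 + rest.length := by
      subst hsplit; simp; omega
    have hcast : (pre.length : Int) + 1 = ((pre ++ [joint]).length : Int) := by simp
    match rest with
    | [] =>
      have hcond : ¬ ((pre.length : Int) < (abs_data.length : Int) - 1) := by
        simp [hlen]
      rw [convertLoopA, if_neg hcond, hcast,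
          ih (pre ++ [joint]) seqs (seq ++ [joint]) (by simp [hsplit])]
      simp [groupRec, consHead]
    | y :: r =>
      have hcond : (pre.length : Int) < (abs_data.length : Int) - 1 := by
        simp [hlen]; omega
      have hget : PySem.List.pyGetD abs_data ((pre.length : Int) + 1) [] = y := by
        have h1 : (pre.length : Int) + 1 = ((pre.length + 1 : Nat) : Int) := by push_cast; ring
        rw [h1, PySem.List.pyGetD_natCast]
        subst hsplit
        rw [List.getD_eq_getElem?_getD]
        rw [List.getElem?_append_right (by omega)]
        simp
      rw [convertLoopA, if_pos hcond, hget]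
      obtain ⟨g, gs, hg⟩ : ∃ g gs, groupRec (y :: r) = g :: gs := by
        cases h : groupRec (y :: r) with
        | nil => exact absurd h (groupRec_ne_nil _)
        | cons a b => exact ⟨a, b, rfl⟩
      by_cases hgt : PySem.List.pyGetD joint 1 0 > PySem.List.pyGetD y 1 0
      · rw [if_pos hgt, hcast,
            ih (pre ++ [joint]) (seqs ++ [seq ++ [joint]]) [] (by simp [hsplit])]
        have hgrec : groupRec (joint :: y :: r) = [joint] :: groupRec (y :: r) := by
          rw [groupRec, if_pos hgt]
        rw [hgrec, hg]
        simp [consHead]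
      · rw [if_neg hgt, hcast,
            ih (pre ++ [joint]) seqs (seq ++ [joint]) (by simp [hsplit])]
        have hgrec : groupRec (joint :: y :: r) = (joint :: g) :: gs := by
          rw [groupRec, if_neg hgt, hg]
        rw [hgrec, hg]
        simp [consHead]

theorem A_eq_groupRec (l : List (List Int)) : convert_to_sequences l = groupRec l := by
  unfold convert_to_sequences
  have h := A_loop_eq l l [] [] [] rfl
  simp only [List.length_nil, Nat.cast_zero] at h
  rw [h]
  cases hg : groupRec l with
  | nil => exact absurd hg (groupRec_ne_nil _)
  | cons g gs => simp [consHead]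

-- ===== VERDICT (by name: the statement is the Claim_ definition above) =====
theorem convert_to_sequences_spec : Claim_equal_convert_to_sequences := by
  intro abs_data _ _
  unfold Spec_convert_to_sequences
  rw [A_eq_groupRec, B_eq_groupRec]
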